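-- pv_equiv track=rewrite | github.com/GaGa-Kim/Algorithm_Study | 02_구현/가희/백준/사탕 게임.py | check
-- ===== SOURCE A (Python) =====
-- def check(color):
--     n = len(color)
--     maxCnt = 1
--
--     for i in range(n):
--         # 열 순회
--         cnt = 1
--         for j in range(1, n):
--             if color[i][j] == color[i][j-1]:
--             # 이전과 같으면 cnt + 1
--                 cnt += 1
--             else:
--             # 이전과 다르면 다시 1로 초기화
--                 cnt = 1
--
--             if cnt > maxCnt:
--                 maxCnt = cnt
--
--         # 행 순회
--         cnt = 1
--         for j in range(1, n):
--             if color[j][i] == color[j-1][i]: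
--             # 이전과 같으면 cnt + 1
--                 cnt += 1
--             else:
--             # 이전과 다르면 다시 1로 초기화
--                 cnt = 1
--
--             if cnt > maxCnt:
--                 maxCnt = cnt
--     return maxCnt
-- ===== SOURCE B (Python) =====
-- def check(color):
--     n = len(color)
--     lines = [[color[i][j] for j in range(n)] for i in range(n)]
--     lines += [[color[j][i] for j in range(n)] for i in range(n)]
--     best = 1
--     for line in lines:
--         bounds = [0] + [j for j in range(1, n) if line[j] != line[j - 1]] + [n]
--         for a, b in zip(bounds, bounds[1:]):
--             if b - a > best:
--                 best = b - a
--     return best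
-- ===== Notes on version B (the rewrite author's own statement) =====
-- stated objective: alternative
-- what changed: B replaces A's interleaved running counter/reset scans with a change-point formulation: it materialises each row and column line, computes the list of break positions where adjacent cells differ, and takes the maximum gap between consecutive boundaries.
-- outside the precondition, e.g. on check([[]]): A returns 1, B raises IndexError; on check([['a'], []]): A raises IndexError, B raises IndexError
import Mathlib
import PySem

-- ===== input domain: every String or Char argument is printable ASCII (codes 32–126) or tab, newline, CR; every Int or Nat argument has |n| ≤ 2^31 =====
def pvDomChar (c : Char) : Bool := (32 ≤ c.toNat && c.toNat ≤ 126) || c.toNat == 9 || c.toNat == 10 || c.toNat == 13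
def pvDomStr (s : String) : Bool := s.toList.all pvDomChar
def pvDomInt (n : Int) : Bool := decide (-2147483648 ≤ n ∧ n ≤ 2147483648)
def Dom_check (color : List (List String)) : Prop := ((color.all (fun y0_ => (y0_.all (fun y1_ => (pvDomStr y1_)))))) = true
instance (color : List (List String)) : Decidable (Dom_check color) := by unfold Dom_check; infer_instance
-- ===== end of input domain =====

-- B replaces A's interleaved running counter/reset scans with a change-point formulation:
-- per row/column line it lists the break positions where adjacent cells differ and takes the
-- maximum gap between consecutive boundaries; objective: alternative (same O(n^2) cost).

-- ===== PORT A =====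
-- helper: color[i][j] (out-of-range only outside Pre_check, where Python raises)
def pyCell (color : List (List String)) (i j : Int) : String :=
  (PySem.List.pyGet? ((PySem.List.pyGet? color i).getD []) j).getD ""

def check (color : List (List String)) : Int :=
  let n : Int := color.length
  (PySem.List.pyRange 0 n 1).foldl (fun maxCnt i =>
    let s1 := (PySem.List.pyRange 1 n 1).foldl (fun (s : Int × Int) j =>
      let cnt : Int := if pyCell color i j == pyCell color i (j-1) then s.1 + 1 else 1
      (cnt, if cnt > s.2 then cnt else s.2)) (1, maxCnt)
    let s2 := (PySem.List.pyRange 1 n 1).foldl (fun (s : Int × Int) j =>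
      let cnt : Int := if pyCell color j i == pyCell color (j-1) i then s.1 + 1 else 1
      (cnt, if cnt > s.2 then cnt else s.2)) (1, s1.2)
    s2.2) 1

-- ===== PORT B =====
-- line[j] of a materialised line (in-range on every use inside Pre_check)
def lineGet (line : List String) (j : Int) : String :=
  (PySem.List.pyGet? line j).getD ""

-- body of Source B's 'for line in lines' loop: boundary positions, then max adjacent gap
def lineBest (n : Int) (line : List String) (best : Int) : Int :=
  let bounds : List Int :=
    0 :: ((PySem.List.pyRange 1 n 1).filter
            (fun j => !(lineGet line j == lineGet line (j-1)))) ++ [n]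
  (bounds.zip bounds.tail).foldl
    (fun best p => if p.2 - p.1 > best then p.2 - p.1 else best) best

def check_alt (color : List (List String)) : Int :=
  let n : Int := color.length
  let lines : List (List String) :=
    ((PySem.List.pyRange 0 n 1).map (fun i =>
        (PySem.List.pyRange 0 n 1).map (fun j => pyCell color i j)))
    ++ ((PySem.List.pyRange 0 n 1).map (fun i =>
        (PySem.List.pyRange 0 n 1).map (fun j => pyCell color j i)))
  lines.foldl (fun best line => lineBest n line best) 1

-- ===== PRECONDITION & SPEC =====
-- Pre_check: every row has at least n = len(color) cells. For n ≥ 2 A itself raises IndexError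
-- on shorter rows; for n = 1 a too-short (empty) row makes A return 1 while B's line
-- construction color[i][j] raises IndexError, so those degenerate inputs are excluded too.
def Pre_check (color : List (List String)) : Prop :=
  ∀ r ∈ color, color.length ≤ r.length
instance (color : List (List String)) : Decidable (Pre_check color) := by
  unfold Pre_check; infer_instance

def pvWitness_check : List (List String) := [["a", "b"], ["b", "b"]]

def Spec_check (color : List (List String)) (out : Int) : Prop := out = check_alt color
instance (color : List (List String)) (out : Int) : Decidable (Spec_check color out) := by
  unfold Spec_check; infer_instance

-- ===== CLAIM (what is proved, stated in full; the proofs are below) =====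
def Claim_equal_check : Prop :=
  ∀ (color : List (List String)), Dom_check color → Pre_check color → Spec_check color (check color)

-- ===== LEMMAS AND PROOFS =====

-- ---- proof-side abstraction: maximal-run fold (runLen = first run, bestRun = fold of runs)
def runLen (x : String) : List String → Nat × List String
  | [] => (0, [])
  | y :: ys => if y == x then ((runLen x ys).1 + 1, (runLen x ys).2) else (0, y :: ys)

def bestRunGo : Nat → List String → Int → Int
  | 0, _, best => best
  | _, [], best => best
  | fuel+1, x :: xs, best =>
    bestRunGo fuel (runLen x xs).2
      (if ((runLen x xs).1 : Int) + 1 > best then ((runLen x xs).1 : Int) + 1 else best)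

def bestRun (l : List String) (best : Int) : Int := bestRunGo l.length l best

theorem runLen_snd_length (x : String) : ∀ ys : List String, (runLen x ys).2.length ≤ ys.length := by
  intro ys
  induction ys with
  | nil => simp [runLen]
  | cons y ys ih =>
    by_cases h : (y == x) = true
    · simp only [runLen, h, if_pos]; simpa using Nat.le_succ_of_le ih
    · simp [runLen, h]

theorem runLen_split (x : String) : ∀ ys : List String,
    (runLen x ys).1 + (runLen x ys).2.length = ys.length := by
  intro ys
  induction ys with
  | nil => simp [runLen]
  | cons y ys ih =>
    by_cases h : (y == x) = true
    · simp only [runLen, h, if_pos, List.length_cons]; omega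
    · simp [runLen, h]

theorem ite_gt_max (m c : Int) : (if c > m then c else m) = max m c := by
  by_cases h : c > m
  · simp [h]; omega
  · simp [h]; omega

theorem max_run_step (mc cnt k : Int) (hk : 0 ≤ k) :
    max (max mc (cnt + 1)) (cnt + 1 + k) = max mc (cnt + (k + 1)) := by
  rw [max_assoc, max_eq_right (by omega : cnt + 1 ≤ cnt + 1 + k)]
  congr 1
  ring

-- ---- abstraction of A's inner counter/reset scan over a line
def scanC : List String → String → Int → Int → Int
  | [], _, _, mc => mc
  | y :: ys, prev, cnt, mc =>
    scanC ys y (if y == prev then cnt + 1 else 1) (max mc (if y == prev then cnt + 1 else 1))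

theorem bestRunGo_fuel : ∀ (f1 f2 : Nat) (l : List String) (best : Int),
    l.length ≤ f1 → l.length ≤ f2 → bestRunGo f1 l best = bestRunGo f2 l best := by
  intro f1
  induction f1 with
  | zero =>
    intro f2 l best h1 _
    have : l = [] := List.eq_nil_of_length_eq_zero (by omega)
    subst this
    cases f2 <;> simp [bestRunGo]
  | succ f1 ih =>
    intro f2 l best h1 h2
    cases l with
    | nil => cases f2 <;> simp [bestRunGo]
    | cons x xs =>
      cases f2 with
      | zero => simp at h2
      | succ f2 =>
        simp only [bestRunGo]
        have hr := runLen_snd_length x xs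
        exact ih f2 _ _ (by simp at h1 ⊢; omega) (by simp at h2 ⊢; omega)

theorem bestRun_nil (best : Int) : bestRun [] best = best := rfl

theorem bestRun_cons (x : String) (xs : List String) (best : Int) :
    bestRun (x :: xs) best =
      bestRun (runLen x xs).2
        (if ((runLen x xs).1 : Int) + 1 > best then ((runLen x xs).1 : Int) + 1 else best) := by
  unfold bestRun
  simp only [List.length_cons, bestRunGo]
  exact bestRunGo_fuel _ _ _ _ (runLen_snd_length x xs) le_rfl

theorem scanC_run : ∀ (xs : List String) (prev : String) (cnt mc : Int), 1 ≤ cnt → cnt ≤ mc →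
    scanC xs prev cnt mc =
      (match (runLen prev xs).2 with
       | [] => max mc (cnt + (runLen prev xs).1)
       | y :: ys => scanC ys y 1 (max mc (cnt + (runLen prev xs).1))) := by
  intro xs
  induction xs with
  | nil =>
    intro prev cnt mc h1 h2
    simp only [scanC, runLen]
    push_cast
    rw [max_def]; split_ifs <;> omega
  | cons y ys ih =>
    intro prev cnt mc h1 h2
    by_cases h : (y == prev) = true
    · have hy : y = prev := eq_of_beq h
      subst hy
      simp only [scanC, beq_self_eq_true, if_pos, runLen]
      rw [ih y (cnt+1) (max mc (cnt+1)) (by omega) (le_max_right _ _)]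
      cases hrest : (runLen y ys).2 with
      | nil =>
        simp only []
        push_cast
        exact max_run_step _ _ _ (Int.natCast_nonneg _)
      | cons z zs =>
        simp only []
        congr 1
        push_cast
        exact max_run_step _ _ _ (Int.natCast_nonneg _)
    · simp only [scanC, h, if_neg, Bool.false_eq_true, not_false_iff, runLen]
      have h1' : max mc cnt = mc := max_eq_left h2
      have h2' : max mc 1 = mc := max_eq_left (by omega)
      simp only [Int.add_zero, CharP.cast_eq_zero]
      rw [h1', h2']

theorem scanC_eq_bestRun : ∀ (N : Nat) (xs : List String), xs.length ≤ N →
    ∀ (x : String) (mc : Int), 1 ≤ mc → scanC xs x 1 mc = bestRun (x :: xs) mc := by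
  intro N
  induction N with
  | zero =>
    intro xs hxs x mc hmc
    have : xs = [] := List.eq_nil_of_length_eq_zero (by omega)
    subst this
    simp only [scanC, bestRun_cons, runLen, bestRun_nil]
    push_cast
    omega
  | succ N ih =>
    intro xs hxs x mc hmc
    rw [scanC_run xs x 1 mc le_rfl hmc, bestRun_cons, ite_gt_max]
    cases hrest : (runLen x xs).2 with
    | nil =>
      simp only [bestRun_nil]
      congr 1
      ring
    | cons y ys =>
      have hlen : ys.length ≤ N := by
        have := runLen_snd_length x xs
        rw [hrest] at this
        simp at this
        omega
      rw [show (max mc (1 + ((runLen x xs).1:Int))) = max mc (((runLen x xs).1:Int)+1) by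
        rw [add_comm]]
      exact ih ys hlen y _ (le_trans hmc (le_max_left _ _))

-- ---- max/monotonicity facts about bestRun and folds of bestRun
theorem bestRunGo_max : ∀ (fuel : Nat) (l : List String) (a b : Int),
    bestRunGo fuel l (max a b) = max a (bestRunGo fuel l b) := by
  intro fuel
  induction fuel with
  | zero => intro l a b; simp [bestRunGo]
  | succ fuel ih =>
    intro l a b
    cases l with
    | nil => simp [bestRunGo]
    | cons x xs =>
      simp only [bestRunGo, ite_gt_max]
      rw [max_assoc, ih]

theorem bestRun_max (l : List String) (a b : Int) :
    bestRun l (max a b) = max a (bestRun l b) := bestRunGo_max _ l a b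

theorem bestRunGo_ge : ∀ (fuel : Nat) (l : List String) (b : Int), b ≤ bestRunGo fuel l b := by
  intro fuel
  induction fuel with
  | zero => intro l b; simp [bestRunGo]
  | succ fuel ih =>
    intro l b
    cases l with
    | nil => simp [bestRunGo]
    | cons x xs =>
      simp only [bestRunGo, ite_gt_max]
      calc b ≤ max b (((runLen x xs).1 : Int) + 1) := le_max_left _ _
        _ ≤ _ := ih _ _

theorem bestRun_ge (l : List String) (b : Int) : b ≤ bestRun l b := bestRunGo_ge _ l b

theorem fold_bestRun_max (L : List (List String)) (a b : Int) :
    L.foldl (fun b l => bestRun l b) (max a b) = max a (L.foldl (fun b l => bestRun l b) b) := by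
  induction L generalizing b with
  | nil => simp
  | cons l L ih => simp only [List.foldl_cons, bestRun_max, ih]

theorem fold_bestRun_ge (L : List (List String)) (b : Int) :
    b ≤ L.foldl (fun b l => bestRun l b) b := by
  induction L generalizing b with
  | nil => simp
  | cons l L ih => exact le_trans (bestRun_ge l b) (ih _)

theorem bestRun_comm_fold (L : List (List String)) (g : List String) (X : Int) (hX : 1 ≤ X) :
    L.foldl (fun b l => bestRun l b) (bestRun g X)
      = bestRun g (L.foldl (fun b l => bestRun l b) X) := by
  have hX' : X = max X 1 := by omega
  have h1 : bestRun g X = max (bestRun g 1) X := by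
    conv_lhs => rw [hX', bestRun_max]
    omega
  have hF : X ≤ L.foldl (fun b l => bestRun l b) X := fold_bestRun_ge L X
  have h2 : bestRun g (L.foldl (fun b l => bestRun l b) X)
      = max (bestRun g 1) (L.foldl (fun b l => bestRun l b) X) := by
    conv_lhs => rw [show L.foldl (fun b l => bestRun l b) X
      = max (L.foldl (fun b l => bestRun l b) X) 1 by omega, bestRun_max]
    omega
  rw [h1, h2, fold_bestRun_max]

-- ---- interleaved row/col folding splits into rows-fold then cols-fold
theorem split_fold : ∀ (L : List Nat) (f g : Nat → List String) (mc : Int), 1 ≤ mc →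
    L.foldl (fun m i => bestRun (g i) (bestRun (f i) m)) mc
      = (L.map g).foldl (fun b l => bestRun l b)
          ((L.map f).foldl (fun b l => bestRun l b) mc) := by
  intro L f g
  induction L with
  | nil => intro mc _; simp
  | cons i L ih =>
    intro mc hmc
    simp only [List.foldl_cons, List.map_cons]
    rw [ih _ (le_trans hmc (le_trans (bestRun_ge _ _) (bestRun_ge _ _)))]
    congr 1
    rw [bestRun_comm_fold _ _ _ (le_trans hmc (bestRun_ge _ _))]

-- ---- A's inner index fold is scanC over the line read through a getter
def stepG (g : Int → String) (s : Int × Int) (j : Int) : Int × Int :=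
  (if g j == g (j-1) then s.1 + 1 else 1,
   if (if g j == g (j-1) then s.1 + 1 else 1) > s.2 then (if g j == g (j-1) then s.1 + 1 else 1) else s.2)

theorem innerScan (g : Int → String) : ∀ (m : Nat) (a cnt mc : Int),
    ((PySem.List.pyRange (a+1) (a+1+m) 1).foldl (stepG g) (cnt, mc)).2
      = scanC ((List.range m).map (fun (k : Nat) => g (a+1+(k:Int)))) (g a) cnt mc := by
  intro m
  induction m with
  | zero =>
    intro a cnt mc
    rw [PySem.List.pyRange_one_eq_nil (by push_cast; omega)]
    simp [scanC]
  | succ m ih =>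
    intro a cnt mc
    rw [PySem.List.pyRange_one_cons (by push_cast; omega)]
    simp only [List.foldl_cons]
    have hrest : a + 1 + ((m+1 : Nat) : Int) = (a + 1) + 1 + (m : Int) := by push_cast; ring
    rw [hrest]
    have hstep : stepG g (cnt, mc) (a+1)
        = (if g (a+1) == g a then cnt + 1 else 1,
           max mc (if g (a+1) == g a then cnt + 1 else 1)) := by
      simp only [stepG, ite_gt_max, add_sub_cancel_right]
    rw [hstep, ih (a+1)]
    rw [List.range_succ_eq_map, List.map_cons, List.map_map]
    simp only [scanC, Nat.cast_zero, add_zero]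
    congr 1
    apply List.map_congr_left
    intro k _
    simp only [Function.comp]
    congr 1
    push_cast
    ring

theorem inner_bestRun (g : Int → String) (n : Nat) (hn : 1 ≤ n) (mc : Int) (hmc : 1 ≤ mc) :
    ((PySem.List.pyRange 1 (n : Int) 1).foldl (stepG g) (1, mc)).2
      = bestRun ((List.range n).map (fun (k : Nat) => g (k : Int))) mc := by
  obtain ⟨m, rfl⟩ : ∃ m, n = m + 1 := ⟨n - 1, by omega⟩
  have H := innerScan g m 0 1 mc
  norm_num at H
  rw [show ((m+1 : Nat) : Int) = 1 + (m : Int) by push_cast; ring, H]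
  rw [scanC_eq_bestRun ((List.range m).map (fun (k : Nat) => g (1+(k:Int)))).length _ le_rfl _ mc hmc]
  congr 1
  rw [List.range_succ_eq_map, List.map_cons, List.map_map]
  simp only [Nat.cast_zero, List.cons.injEq]
  refine ⟨by trivial, ?_⟩
  · apply List.map_congr_left
    intro k _
    simp only [Function.comp]
    congr 1
    push_cast
    ring

-- ---- B side: break positions, structurally
def breaks : String → List String → Int → List Int
  | _, [], _ => []
  | prev, y :: ys, p => if y == prev then breaks y ys (p+1) else p :: breaks y ys (p+1)

theorem filter_breaks (g : Int → String) : ∀ (m : Nat) (a : Int),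
    (PySem.List.pyRange (a+1) (a+1+m) 1).filter (fun j => !(g j == g (j-1)))
      = breaks (g a) ((List.range m).map (fun (k : Nat) => g (a+1+(k:Int)))) (a+1) := by
  intro m
  induction m with
  | zero =>
    intro a
    rw [PySem.List.pyRange_one_eq_nil (by push_cast; omega)]
    simp [breaks]
  | succ m ih =>
    intro a
    rw [PySem.List.pyRange_one_cons (by push_cast; omega)]
    have hrest : a + 1 + ((m+1 : Nat) : Int) = (a + 1) + 1 + (m : Int) := by push_cast; ring
    rw [List.filter_cons, hrest, ih (a+1)]
    rw [List.range_succ_eq_map, List.map_cons, List.map_map]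
    have hmap : (List.range m).map ((fun (k : Nat) => g (a+1+(k:Int))) ∘ (fun k => k + 1))
        = (List.range m).map (fun (k : Nat) => g (a+1+1+(k:Int))) := by
      apply List.map_congr_left
      intro k _
      simp only [Function.comp]
      congr 1
      push_cast
      ring
    simp only [breaks, Nat.cast_zero, add_zero, add_sub_cancel_right, hmap]
    by_cases h : (g (a+1) == g a) = true
    · simp [h]
    · simp [h]

-- gStep = Source B's inner gap-max update
def gStep (best : Int) (p : Int × Int) : Int := if p.2 - p.1 > best then p.2 - p.1 else best

theorem breaks_run : ∀ (xs : List String) (x : String) (p : Int),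
    breaks x xs p =
      (match (runLen x xs).2 with
       | [] => []
       | y :: ys => (p + ((runLen x xs).1 : Int)) :: breaks y ys (p + ((runLen x xs).1 : Int) + 1)) := by
  intro xs
  induction xs with
  | nil => intro x p; simp [breaks, runLen]
  | cons y ys ih =>
    intro x p
    by_cases h : (y == x) = true
    · have hy : y = x := eq_of_beq h
      subst hy
      simp only [breaks, runLen, beq_self_eq_true, if_pos]
      rw [ih y (p+1)]
      cases hrest : (runLen y ys).2 with
      | nil => simp only []
      | cons z zs =>
        simp only []
        push_cast
        have e1 : p + 1 + ((runLen y ys).1 : Int) = p + (((runLen y ys).1 : Int) + 1) := by ring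
        rw [e1]
    · simp [breaks, runLen, h]

-- adjacent-gap fold over boundaries equals bestRun
theorem gaps_eq_bestRun : ∀ (N : Nat) (xs : List String), xs.length ≤ N →
    ∀ (x : String) (a best : Int), 1 ≤ best →
    (((a :: breaks x xs (a+1)) ++ [a + 1 + (xs.length : Int)]).zip
      (breaks x xs (a+1) ++ [a + 1 + (xs.length : Int)])).foldl gStep best
      = bestRun (x :: xs) best := by
  intro N
  induction N with
  | zero =>
    intro xs hxs x a best hb
    have : xs = [] := List.eq_nil_of_length_eq_zero (by omega)
    subst this
    simp only [breaks, List.nil_append, List.singleton_append, List.length_nil, Nat.cast_zero,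
      add_zero, List.zip_cons_cons, List.zip_nil_right, List.foldl_cons, List.foldl_nil, gStep]
    rw [bestRun_cons x [] best]
    simp only [runLen, bestRun_nil, Nat.cast_zero]
    rw [show a + 1 - a = (1:Int) by ring]
    split_ifs <;> omega
  | succ N ih =>
    intro xs hxs x a best hb
    rw [breaks_run xs x (a+1)]
    cases hrest : (runLen x xs).2 with
    | nil =>
      have hr : ((runLen x xs).1 : Int) = (xs.length : Int) := by
        have := runLen_split x xs
        rw [hrest] at this
        simp at this
        exact_mod_cast this
      simp only [List.nil_append, List.singleton_append, List.zip_cons_cons,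
        List.zip_nil_right, List.foldl_cons, List.foldl_nil, gStep]
      rw [bestRun_cons, hrest, bestRun_nil, hr]
      rw [show a + 1 + (xs.length : Int) - a = (xs.length : Int) + 1 by ring]
    | cons y ys =>
      have hsplit := runLen_split x xs
      rw [hrest] at hsplit
      simp only [List.length_cons] at hsplit
      have hys : ys.length ≤ N := by omega
      have hxl : a + 1 + (xs.length : Int)
          = (a + 1 + ((runLen x xs).1 : Int)) + 1 + (ys.length : Int) := by
        omega
      simp only [List.cons_append, List.zip_cons_cons, List.foldl_cons]
      rw [hxl]
      have hstep : gStep best (a, a + 1 + ((runLen x xs).1 : Int))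
          = max best (((runLen x xs).1 : Int) + 1) := by
        simp only [gStep,
          show a + 1 + ((runLen x xs).1 : Int) - a = ((runLen x xs).1 : Int) + 1 by ring,
          ite_gt_max]
      rw [hstep]
      have hIH := ih ys hys y (a + 1 + ((runLen x xs).1 : Int))
        (max best (((runLen x xs).1 : Int) + 1)) (le_trans hb (le_max_left _ _))
      simp only [List.cons_append] at hIH
      rw [hIH]
      conv_rhs => rw [bestRun_cons, hrest]
      rw [ite_gt_max]

-- ---- the per-line body of B equals bestRun on an index-materialised line
theorem lineBest_eq_bestRun (g : Int → String) (n : Nat) (hn : 1 ≤ n) (best : Int)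
    (hb : 1 ≤ best) :
    lineBest (n : Int) ((List.range n).map (fun (k : Nat) => g (k : Int))) best
      = bestRun ((List.range n).map (fun (k : Nat) => g (k : Int))) best := by
  obtain ⟨m, rfl⟩ : ∃ m, n = m + 1 := ⟨n - 1, by omega⟩
  unfold lineBest
  have hget : ∀ j ∈ PySem.List.pyRange 1 ((m+1 : Nat) : Int) 1,
      (fun j => !(lineGet ((List.range (m+1)).map (fun (k : Nat) => g (k : Int))) j ==
                  lineGet ((List.range (m+1)).map (fun (k : Nat) => g (k : Int))) (j-1)))
        j = (fun j => !(g j == g (j-1))) j := by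
    intro j hj
    rw [PySem.List.mem_pyRange_one] at hj
    have h1 : 1 ≤ j := hj.1
    have h2 : j < ((m+1 : Nat) : Int) := hj.2
    have hval : ∀ (i : Int), 0 ≤ i → i < ((m+1 : Nat) : Int) →
        lineGet ((List.range (m+1)).map (fun (k : Nat) => g (k : Int))) i = g i := by
      intro i hi0 hiN
      obtain ⟨k, rfl⟩ : ∃ k : Nat, i = (k : Int) := ⟨i.toNat, (Int.toNat_of_nonneg hi0).symm⟩
      have hk : k < m + 1 := by exact_mod_cast hiN
      unfold lineGet
      rw [PySem.List.pyGet?_natCast]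
      rw [List.getElem?_eq_getElem (by simpa using hk)]
      simp
    simp only []
    rw [hval j (by omega) h2, hval (j-1) (by omega) (by omega)]
  rw [List.filter_congr hget]
  have hrange : PySem.List.pyRange 1 ((m+1 : Nat) : Int) 1
      = PySem.List.pyRange (0+1) (0+1+(m : Int)) 1 := by
    congr 1 <;> (push_cast; ring)
  rw [hrange, filter_breaks g m 0]
  have hline : (List.range (m+1)).map (fun (k : Nat) => g (k : Int))
      = g 0 :: (List.range m).map (fun (k : Nat) => g (0+1+(k : Int))) := by
    rw [List.range_succ_eq_map, List.map_cons, List.map_map]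
    simp only [Nat.cast_zero, List.cons.injEq]
    refine ⟨by trivial, ?_⟩
    apply List.map_congr_left
    intro k _
    simp only [Function.comp]
    congr 1
    push_cast
    ring
  rw [hline]
  have hlen : (((List.range m).map (fun (k : Nat) => g (0+1+(k : Int)))).length : Int)
      = (m : Int) := by simp
  have hend : ((m+1 : Nat) : Int)
      = 0 + 1 + (((List.range m).map (fun (k : Nat) => g (0+1+(k : Int)))).length : Int) := by
    rw [hlen]; push_cast; ring
  rw [hend]
  exact gaps_eq_bestRun ((List.range m).map (fun (k : Nat) => g (0+1+(k : Int)))).length _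
    le_rfl (g 0) 0 best hb

-- ---- the outer fold of A, rewritten line by line
def bodyA (color : List (List String)) (n : Int) (mc i : Int) : Int :=
  ((PySem.List.pyRange 1 n 1).foldl (stepG (fun j => pyCell color j i))
    (1, ((PySem.List.pyRange 1 n 1).foldl (stepG (fun j => pyCell color i j)) (1, mc)).2)).2

theorem check_eq_bodyA (color : List (List String)) :
    check color = (PySem.List.pyRange 0 color.length 1).foldl (bodyA color color.length) 1 := rfl

def rowIdx (color : List (List String)) (i : Int) : List String :=
  (List.range color.length).map (fun (k : Nat) => pyCell color i (k : Int))

def colIdx (color : List (List String)) (i : Int) : List String :=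
  (List.range color.length).map (fun (k : Nat) => pyCell color (k : Int) i)

theorem bodyA_eq (color : List (List String)) (i : Int) (h0 : 0 ≤ i)
    (hi : i < (color.length : Int)) (mc : Int) (hmc : 1 ≤ mc) :
    bodyA color color.length mc i = bestRun (colIdx color i) (bestRun (rowIdx color i) mc) := by
  have hn : 1 ≤ color.length := by omega
  unfold bodyA
  rw [inner_bestRun (fun j => pyCell color i j) color.length hn mc hmc]
  rw [inner_bestRun (fun j => pyCell color j i) color.length hn _
      (le_trans hmc (bestRun_ge _ _))]
  rfl

theorem outer_fold (color : List (List String)) :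
    ∀ (L : List Int), (∀ i ∈ L, 0 ≤ i ∧ i < (color.length : Int)) → ∀ (mc : Int), 1 ≤ mc →
    L.foldl (bodyA color color.length) mc
      = L.foldl (fun m i => bestRun (colIdx color i) (bestRun (rowIdx color i) m)) mc := by
  intro L
  induction L with
  | nil => intro _ mc _; rfl
  | cons i L ih =>
    intro hL mc hmc
    simp only [List.foldl_cons]
    rw [bodyA_eq color i (hL i (by simp)).1 (hL i (by simp)).2 mc hmc]
    exact ih (fun j hj => hL j (by simp [hj])) _
      (le_trans hmc (le_trans (bestRun_ge _ _) (bestRun_ge _ _)))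

-- fold of lineBest equals fold of bestRun on lines of the materialised shape
theorem fold_lineBest (n : Nat) (hn : 1 ≤ n) :
    ∀ (L : List (List String)),
      (∀ l ∈ L, ∃ g : Int → String, l = (List.range n).map (fun (k : Nat) => g (k : Int))) →
      ∀ (best : Int), 1 ≤ best →
      L.foldl (fun b line => lineBest (n : Int) line b) best
        = L.foldl (fun b l => bestRun l b) best := by
  intro L
  induction L with
  | nil => intro _ best _; rfl
  | cons l L ih =>
    intro hshape best hb
    obtain ⟨g, rfl⟩ := hshape l (by simp)
    simp only [List.foldl_cons]
    rw [lineBest_eq_bestRun g n hn best hb]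
    exact ih (fun l hl => hshape l (by simp [hl])) _ (le_trans hb (bestRun_ge _ _))

-- ===== VERDICT (by name: the statement is the Claim_ definition above) =====
theorem check_spec : Claim_equal_check := by
  intro color _ hpre
  unfold Spec_check
  cases hcolor : color.length with
  | zero =>
    have : color = [] := List.eq_nil_of_length_eq_zero hcolor
    subst this
    decide
  | succ m =>
    have hn : 1 ≤ color.length := by omega
    have halt : check_alt color
        = (((List.range color.length).map (fun (k : Nat) => rowIdx color (k : Int)))
            ++ ((List.range color.length).map (fun (k : Nat) => colIdx color (k : Int)))).foldl
              (fun b line => lineBest (color.length : Int) line b) 1 := by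
      simp only [check_alt, PySem.List.pyRange_zero_nat, List.map_map]
      rfl
    have hshape : ∀ l ∈ ((List.range color.length).map (fun (k : Nat) => rowIdx color (k : Int)))
        ++ ((List.range color.length).map (fun (k : Nat) => colIdx color (k : Int))),
        ∃ g : Int → String,
          l = (List.range color.length).map (fun (k : Nat) => g (k : Int)) := by
      intro l hl
      rcases List.mem_append.mp hl with h | h
      · obtain ⟨k, _, rfl⟩ := List.mem_map.mp h
        exact ⟨fun j => pyCell color (k : Int) j, rfl⟩
      · obtain ⟨k, _, rfl⟩ := List.mem_map.mp h
        exact ⟨fun j => pyCell color j (k : Int), rfl⟩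
    rw [halt, fold_lineBest color.length hn _ hshape 1 le_rfl]
    rw [check_eq_bodyA]
    rw [outer_fold color _ (fun i hi => by rw [PySem.List.mem_pyRange_one] at hi; exact hi) 1
        le_rfl]
    rw [PySem.List.pyRange_zero_nat, List.foldl_map]
    rw [split_fold (List.range color.length)
        (fun k => rowIdx color (k : Int)) (fun k => colIdx color (k : Int)) 1 le_rfl]
    rw [← List.foldl_append]
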